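-- pv_equiv track=rewrite | github.com/holgern/BeemBot.py | Cogs/PCPP.py | find_last_between
-- ===== SOURCE A (Python) =====
-- def find_last_between( source, start_sep, end_sep ):
-- 	result=[]
-- 	tmp=source.split(start_sep)
-- 	for par in tmp:
-- 		if end_sep in par:
-- 			result.append(par.split(end_sep)[0])
-- 	if len(result) == 0:
-- 		return None
-- 	else:
-- 		return result[len(result)-1] # Return last item
-- ===== SOURCE B (Python) =====
-- def find_last_between(source, start_sep, end_sep):
--     for par in reversed(source.split(start_sep)):
--         if end_sep in par:
--             return par.split(end_sep)[0]
--     return None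
-- ===== Notes on version B (the rewrite author's own statement) =====
-- stated objective: simpler
-- what changed: Replaces the accumulate-all-matches-then-index-the-last pass with a reverse scan over the split parts that returns the first matching prefix directly, eliminating the result list.
import Mathlib
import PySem

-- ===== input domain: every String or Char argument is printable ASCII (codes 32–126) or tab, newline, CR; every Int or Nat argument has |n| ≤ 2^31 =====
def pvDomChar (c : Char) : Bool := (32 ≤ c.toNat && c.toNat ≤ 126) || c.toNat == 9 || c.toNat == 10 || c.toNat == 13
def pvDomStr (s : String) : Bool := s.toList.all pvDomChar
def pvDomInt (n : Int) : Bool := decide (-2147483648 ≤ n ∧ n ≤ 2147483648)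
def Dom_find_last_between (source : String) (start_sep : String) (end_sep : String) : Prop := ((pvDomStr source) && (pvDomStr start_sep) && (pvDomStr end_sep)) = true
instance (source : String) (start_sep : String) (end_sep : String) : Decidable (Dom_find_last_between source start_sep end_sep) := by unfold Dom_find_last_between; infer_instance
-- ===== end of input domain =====

-- B replaces A's collect-all-matches-then-take-the-last pass with an early-return reverse scan
-- over the same split parts (objective: simpler — no accumulator list).

-- ===== PORT A =====
def find_last_between (source : String) (start_sep : String) (end_sep : String) : Option String :=
  match PySem.Str.split? source start_sep with
  | none => none      -- ValueError on start_sep = "" (excluded by Pre_)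
  | some tmp =>
    let result := tmp.foldl (fun acc par =>
      if PySem.Str.isIn end_sep par then
        match PySem.Str.split? par end_sep with
        | none => acc         -- ValueError on end_sep = "" (excluded by Pre_)
        | some pieces => acc ++ [PySem.List.pyGetD pieces 0 ""]
      else acc) ([] : List String)
    if result.length = 0 then none
    else PySem.List.pyGet? result ((result.length : Int) - 1)

-- ===== PORT B =====
-- the early-return reverse loop of Source B: first part (scanning from the right) containing end_sep
def altScan (end_sep : String) : List String → Option String
  | [] => none
  | par :: rest =>
    if PySem.Str.isIn end_sep par then
      match PySem.Str.split? par end_sep with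
      | none => none          -- ValueError on end_sep = "" (excluded by Pre_)
      | some pieces => some (PySem.List.pyGetD pieces 0 "")
    else altScan end_sep rest

def find_last_between_alt (source : String) (start_sep : String) (end_sep : String) : Option String :=
  match PySem.Str.split? source start_sep with
  | none => none      -- ValueError on start_sep = "" (excluded by Pre_)
  | some tmp => altScan end_sep tmp.reverse

-- ===== PRECONDITION & SPEC =====
-- Pre_ excludes exactly the inputs where Python raises ValueError: an empty separator
-- ('' for start_sep always raises in split; '' for end_sep makes the first part hit split('')).
def Pre_find_last_between (source : String) (start_sep : String) (end_sep : String) : Prop :=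
  start_sep ≠ "" ∧ end_sep ≠ ""
instance (source : String) (start_sep : String) (end_sep : String) : Decidable (Pre_find_last_between source start_sep end_sep) := by unfold Pre_find_last_between; infer_instance

def pvWitness_find_last_between : String × String × String := ("a<b>c<d>e", "<", ">")

def Spec_find_last_between (source : String) (start_sep : String) (end_sep : String) (out : Option String) : Prop := out = find_last_between_alt source start_sep end_sep
instance (source : String) (start_sep : String) (end_sep : String) (out : Option String) : Decidable (Spec_find_last_between source start_sep end_sep out) := by unfold Spec_find_last_between; infer_instance

-- ===== CLAIM (what is proved, stated in full; the proofs are below) =====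
def Claim_equal_find_last_between : Prop := ∀ (source : String) (start_sep : String) (end_sep : String), Dom_find_last_between source start_sep end_sep → Pre_find_last_between source start_sep end_sep → Spec_find_last_between source start_sep end_sep (find_last_between source start_sep end_sep)

-- ===== LEMMAS AND PROOFS =====

-- under end_sep ≠ "", the inner split on end_sep is a plain value; write it once
theorem split_end_eq (par end_sep : String) (he : end_sep ≠ "") :
    PySem.Str.split? par end_sep
      = some (List.map String.ofList (PySem.Chars.splitOn par.toList end_sep.toList)) := by
  have h : end_sep.toList.isEmpty = false := by
    simp [List.isEmpty_eq_false_iff]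
    exact he
  simp [PySem.Str.split?, PySem.Chars.split?, h]

-- B's reverse scan returns the head of the filtered-and-mapped parts
theorem altScan_eq (end_sep : String) (he : end_sep ≠ "") (l : List String) :
    altScan end_sep l
      = ((l.filter (fun par => PySem.Str.isIn end_sep par)).map
          (fun par => PySem.List.pyGetD
            (List.map String.ofList (PySem.Chars.splitOn par.toList end_sep.toList)) 0 "")).head? := by
  induction l with
  | nil => rfl
  | cons par rest ih =>
    by_cases hp : PySem.Chars.isIn end_sep.toList par.toList = true
    · simp [altScan, split_end_eq par end_sep he, hp]
    · simp [altScan, hp, ih]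

theorem find_last_between_spec' (source start_sep end_sep : String)
    (_hs : start_sep ≠ "") (he : end_sep ≠ "") :
    find_last_between source start_sep end_sep = find_last_between_alt source start_sep end_sep := by
  unfold find_last_between find_last_between_alt
  cases hsp : PySem.Str.split? source start_sep with
  | none => rfl
  | some tmp =>
    simp only
    -- normalise A's fold body, then collapse it with foldl_append_if
    have hbody : (fun (acc : List String) (par : String) =>
        if PySem.Str.isIn end_sep par then
          match PySem.Str.split? par end_sep with
          | none => acc
          | some pieces => acc ++ [PySem.List.pyGetD pieces 0 ""]
        else acc)
      = (fun acc par =>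
          if PySem.Str.isIn end_sep par = true then
            acc ++ [PySem.List.pyGetD
              (List.map String.ofList (PySem.Chars.splitOn par.toList end_sep.toList)) 0 ""]
          else acc) := by
      funext acc par
      by_cases hp : PySem.Chars.isIn end_sep.toList par.toList = true
      · simp [split_end_eq par end_sep he, hp]
      · simp [hp]
    rw [hbody, PySem.List.foldl_append_if, altScan_eq end_sep he, List.filter_reverse,
        List.map_reverse, List.head?_reverse]
    set R := ((tmp.filter (fun par => PySem.Str.isIn end_sep par)).map
      (fun par => PySem.List.pyGetD
        (List.map String.ofList (PySem.Chars.splitOn par.toList end_sep.toList)) 0 "")) with hR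
    by_cases h0 : R.length = 0
    · simp [List.length_eq_zero_iff.mp h0]
    · have hlen : 1 ≤ R.length := Nat.one_le_iff_ne_zero.mpr h0
      have hcast : ((R.length : Int) - 1) = ((R.length - 1 : Nat) : Int) := by omega
      simp only [List.nil_append, h0, if_false, hcast, PySem.List.pyGet?_natCast,
        List.getLast?_eq_getElem?]

-- ===== VERDICT (by name: the statement is the Claim_ definition above) =====
theorem find_last_between_spec : Claim_equal_find_last_between := by
  intro source start_sep end_sep _ hpre
  exact find_last_between_spec' source start_sep end_sep hpre.1 hpre.2
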